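-- pv_equiv track=rewrite | github.com/trangyp/AMOS-Code | repo_doctor/fast_document_reader.py | _build_section_boundaries
-- ===== SOURCE A (Python) =====
-- def _build_section_boundaries(
--     headings: list[tuple[int, str, int]], total_len: int
-- ) -> list[tuple[str, int, int]]:
--     """Build section boundaries from heading hierarchy."""
--     if not headings:
--         return []
--
--     boundaries = []
--     for i, (_level, text, start) in enumerate(headings):
--         end = headings[i + 1][2] if i + 1 < len(headings) else total_len
--         boundaries.append((text, start, end))
--
--     return boundaries
-- ===== SOURCE B (Python) =====
-- def _build_section_boundaries(
--     headings: list[tuple[int, str, int]], total_len: int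
-- ) -> list[tuple[str, int, int]]:
--     """Build section boundaries by a single reverse pass threading next_start."""
--     if not headings:
--         return []
--
--     out = []
--     next_start = total_len
--     for _level, text, start in reversed(headings):
--         out.append((text, start, next_start))
--         next_start = start
--     out.reverse()
--     return out
-- ===== Notes on version B (the rewrite author's own statement) =====
-- stated objective: alternative
-- what changed: Replaced the forward indexed loop that looks ahead to headings[i+1] with a single reverse pass threading a next_start accumulator (end = next_start, then next_start = start), reversing the result at the end.
import Mathlib
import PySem

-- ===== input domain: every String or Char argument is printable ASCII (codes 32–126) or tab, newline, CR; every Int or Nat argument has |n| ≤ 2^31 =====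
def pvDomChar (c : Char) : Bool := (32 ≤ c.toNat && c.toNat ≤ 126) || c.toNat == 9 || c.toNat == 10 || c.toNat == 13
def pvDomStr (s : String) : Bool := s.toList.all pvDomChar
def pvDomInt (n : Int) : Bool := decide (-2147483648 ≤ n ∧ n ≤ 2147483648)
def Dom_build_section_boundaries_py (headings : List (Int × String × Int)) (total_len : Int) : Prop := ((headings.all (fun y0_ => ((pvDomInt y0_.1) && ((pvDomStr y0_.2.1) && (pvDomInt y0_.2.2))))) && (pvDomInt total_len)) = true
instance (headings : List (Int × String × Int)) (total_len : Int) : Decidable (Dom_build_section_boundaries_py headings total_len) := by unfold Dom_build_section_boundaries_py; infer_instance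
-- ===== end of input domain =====

-- B replaces A's forward indexed loop with look-ahead headings[i+1] by a reverse pass
-- threading a next_start accumulator; same O(n) cost, different decomposition.


-- ===== PORT A =====
def build_section_boundaries_py (headings : List (Int × String × Int)) (total_len : Int) : List (String × Int × Int) :=
  if headings = [] then []
  else
    (PySem.List.enumerate headings 0).foldl
      (fun boundaries p =>
        let e : Int :=
          if p.1 + 1 < (headings.length : Int)
          then (PySem.List.pyGetD headings (p.1 + 1) (0, "", 0)).2.2
          else total_len
        boundaries ++ [(p.2.2.1, p.2.2.2, e)]) []

-- ===== PORT B =====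
def build_section_boundaries_py_alt (headings : List (Int × String × Int)) (total_len : Int) : List (String × Int × Int) :=
  if headings = [] then []
  else
    (headings.reverse.foldl
      (fun st h => (st.1 ++ [(h.2.1, h.2.2, st.2)], h.2.2))
      (([] : List (String × Int × Int)), total_len)).1.reverse

-- ===== PRECONDITION & SPEC =====
def Spec_build_section_boundaries_py (headings : List (Int × String × Int)) (total_len : Int) (out : List (String × Int × Int)) : Prop := out = build_section_boundaries_py_alt headings total_len
instance (headings : List (Int × String × Int)) (total_len : Int) (out : List (String × Int × Int)) : Decidable (Spec_build_section_boundaries_py headings total_len out) := by unfold Spec_build_section_boundaries_py; infer_instance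

-- ===== CLAIM (what is proved, stated in full; the proofs are below) =====
def Claim_equal_build_section_boundaries_py : Prop := ∀ (headings : List (Int × String × Int)) (total_len : Int), Dom_build_section_boundaries_py headings total_len → Spec_build_section_boundaries_py headings total_len (build_section_boundaries_py headings total_len)

-- ===== LEMMAS AND PROOFS =====

/-- Reference shape: each heading paired with the next heading's start (or `tl` for the last). -/
def pvSections : List (Int × String × Int) → Int → List (String × Int × Int)
  | [], _ => []
  | (_, t, s) :: rest, tl =>
      (t, s, match rest with
             | (_, _, s2) :: _ => s2
             | [] => tl) :: pvSections rest tl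

theorem pvSections_length (l : List (Int × String × Int)) (tl : Int) :
    (pvSections l tl).length = l.length := by
  induction l generalizing tl with
  | nil => rfl
  | cons h rest ih => obtain ⟨lv, t, s⟩ := h; simp [pvSections, ih]

theorem pvSections_getElem (l : List (Int × String × Int)) (tl : Int) (i : Nat)
    (h : i < (pvSections l tl).length) (h' : i < l.length) :
    (pvSections l tl)[i] =
      (l[i].2.1, l[i].2.2, if h2 : i + 1 < l.length then l[i + 1].2.2 else tl) := by
  induction l generalizing tl i with
  | nil => simp at h'
  | cons hd rest ih =>
    obtain ⟨lv, t, s⟩ := hd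
    cases i with
    | zero =>
      cases rest with
      | nil => simp [pvSections]
      | cons r rs => obtain ⟨a, b, c⟩ := r; simp [pvSections]
    | succ j =>
      have hj : j < (pvSections rest tl).length := by
        simpa [pvSections_length] using Nat.lt_of_succ_lt_succ h'
      have hj' : j < rest.length := by simpa [pvSections_length] using hj
      simp only [pvSections, List.getElem_cons_succ]
      rw [ih tl j hj hj']
      simp

theorem pvSections_append_last (m : List (Int × String × Int)) (lv : Int) (t : String)
    (s : Int) (tl : Int) :
    pvSections (m ++ [(lv, t, s)]) tl = pvSections m s ++ [(t, s, tl)] := by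
  induction m with
  | nil => simp [pvSections]
  | cons y m' ih =>
    obtain ⟨a, b, c⟩ := y
    cases m' with
    | nil => simp [pvSections]
    | cons z m'' => obtain ⟨za, zb, zc⟩ := z; simp [pvSections] at ih ⊢; exact ih

/-- B's fold, characterised: it emits one triple per element, threading next_start. -/
theorem pvAltFold (r : List (Int × String × Int)) (acc : List (String × Int × Int)) (ns : Int) :
    r.foldl (fun st h => (st.1 ++ [(h.2.1, h.2.2, st.2)], h.2.2)) (acc, ns) =
      (acc ++ (pvSections r.reverse ns).reverse,
       match r.reverse with
       | (_, _, s) :: _ => s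
       | [] => ns) := by
  induction r generalizing acc ns with
  | nil => simp [pvSections]
  | cons h rest ih =>
    obtain ⟨lv, t, s⟩ := h
    simp only [List.foldl_cons, List.reverse_cons]
    rw [ih]
    rw [pvSections_append_last]
    cases hr : rest.reverse with
    | nil =>
      have : rest = [] := by simpa using congrArg List.reverse hr
      subst this; simp [pvSections]
    | cons z zs =>
      obtain ⟨za, zb, zc⟩ := z
      simp [pvSections]

theorem pvAlt_eq (headings : List (Int × String × Int)) (tl : Int) :
    build_section_boundaries_py_alt headings tl = pvSections headings tl := by
  unfold build_section_boundaries_py_alt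
  split
  · next h => subst h; rfl
  · rw [pvAltFold]; simp

theorem pvA_eq (headings : List (Int × String × Int)) (tl : Int) :
    build_section_boundaries_py headings tl = pvSections headings tl := by
  unfold build_section_boundaries_py
  split
  · next h => subst h; rfl
  · rw [PySem.List.foldl_append_singleton_eq_map]
    refine List.ext_getElem (by simp [pvSections_length, PySem.List.length_enumerate]) ?_
    intro i h1 h2
    have hi : i < headings.length := by
      simpa [PySem.List.length_enumerate] using h1
    rw [pvSections_getElem headings tl i h2 hi]
    simp only [List.nil_append, List.getElem_map, PySem.List.getElem_enumerate, zero_add]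
    by_cases hlt : i + 1 < headings.length
    · rw [dif_pos hlt, if_pos (by exact_mod_cast hlt)]
      have hcast : ((i : Int) + 1) = ((i + 1 : Nat) : Int) := by push_cast; ring
      rw [hcast, PySem.List.pyGetD_natCast, List.getD_eq_getElem?_getD,
        List.getElem?_eq_getElem hlt, Option.getD_some]
    · rw [dif_neg hlt, if_neg (by exact_mod_cast hlt)]

-- ===== VERDICT (by name: the statement is the Claim_ definition above) =====
theorem build_section_boundaries_py_spec : Claim_equal_build_section_boundaries_py := by
  intro headings total_len _
  unfold Spec_build_section_boundaries_py
  rw [pvA_eq, pvAlt_eq]
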